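-- pv_equiv track=rewrite | github.com/courtneyfugate-ctrl/logic-miner-engine | sandbox/skeptical_investigation_v2.py | reconstruct_lineage
-- ===== SOURCE A (Python) =====
-- def reconstruct_lineage(addr, p=5):
--     lineage = []
--     temp = addr
--     val = addr - 1
--     k = 0
--     coeffs = []
--     while val > 0 or k == 0:
--         digit = val % p
--         coeffs.append(digit)
--         val //= p
--         k += 1
--
--     current = 1
--     lineage.append(current)
--     # The BFE prefix constructor in algebraic_text.py:
--     # coords[child] = p_coord + c_val * (self.p ** (p_depth + 1))
--     # where p_depth starts at 0 for root.
--     # So child of root (depth 0+1=1) is 1 + c1 * 5^1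
--     # child of that (depth 1+1=2) is (1 + c1 * 5^1) + c2 * 5^2
--     # So the coefficients in base p are [0, c1, c2, c3...]
--     # Wait, 1 + c1*5 + c2*25...
--     # c1 is coeff of 5^1.
--
--     for i in range(1, len(coeffs)):
--         current += coeffs[i] * (p**i)
--         lineage.append(current)
--
--     return lineage
-- ===== SOURCE B (Python) =====
-- def reconstruct_lineage(addr, p=5):
--     # Single streaming pass: peel base-p digits of addr-1 (LSB discarded)
--     # while maintaining the running coordinate and power of p.
--     val = (addr - 1) // p  # discard the least-significant digit
--     lineage = [1]
--     current = 1
--     power = p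
--     while val > 0:
--         current += (val % p) * power
--         lineage.append(current)
--         val //= p
--         power *= p
--     return lineage
-- ===== Notes on version B (the rewrite author's own statement) =====
-- stated objective: simpler
-- what changed: B replaces A's two-phase scheme (build a coeffs digit table, then re-scan it computing p**i each step) with one streaming loop that peels digits while maintaining a running power, so the coeffs list and the exponentiations disappear.
import Mathlib
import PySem

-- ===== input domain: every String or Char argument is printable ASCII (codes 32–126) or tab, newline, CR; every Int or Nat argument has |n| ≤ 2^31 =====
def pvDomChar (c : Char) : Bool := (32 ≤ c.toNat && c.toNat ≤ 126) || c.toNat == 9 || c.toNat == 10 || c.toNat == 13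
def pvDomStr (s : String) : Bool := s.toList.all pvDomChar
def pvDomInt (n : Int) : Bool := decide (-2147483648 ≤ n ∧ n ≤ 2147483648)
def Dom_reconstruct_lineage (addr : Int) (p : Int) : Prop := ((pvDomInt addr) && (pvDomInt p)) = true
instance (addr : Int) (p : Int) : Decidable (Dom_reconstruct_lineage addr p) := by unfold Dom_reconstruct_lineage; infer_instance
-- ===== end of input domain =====

-- B fuses A's two loops into one streaming pass with a running power; return values only, no mutation.

-- ===== PORT A =====
-- while val > 0 or k == 0: digit = val % p; coeffs.append(digit); val //= p; k += 1
-- fuel makes the loop total in Lean; within Pre_ the fuel never runs out.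
def pvALoop (fuel : Nat) (val p : Int) (k : Int) (coeffs : List Int) : List Int :=
  match fuel with
  | 0 => coeffs
  | f + 1 =>
    if val > 0 ∨ k = 0 then
      pvALoop f (PySem.Int.floordiv val p) p (k + 1) (coeffs ++ [PySem.Int.mod val p])
    else coeffs

def reconstruct_lineage (addr : Int) (p : Int) : List Int :=
  let coeffs := pvALoop ((addr - 1).toNat + 3) (addr - 1) p 0 []
  -- for i in range(1, len(coeffs)): current += coeffs[i] * (p**i); lineage.append(current)
  -- i ≥ 1 throughout, so p**i is the exact integer power p ^ i.toNat
  let st := (PySem.List.pyRange 1 (coeffs.length : Int) 1).foldl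
    (fun (s : Int × List Int) i =>
      let cur := s.1 + (PySem.List.pyGetD coeffs i 0) * p ^ i.toNat
      (cur, s.2 ++ [cur])) (1, [1])
  st.2

-- ===== PORT B =====
-- while val > 0: current += (val % p) * power; lineage.append(current); val //= p; power *= p
def pvBLoop (fuel : Nat) (val p cur pow : Int) (lineage : List Int) : List Int :=
  match fuel with
  | 0 => lineage
  | f + 1 =>
    if val > 0 then
      let cur' := cur + (PySem.Int.mod val p) * pow
      pvBLoop f (PySem.Int.floordiv val p) p cur' (pow * p) (lineage ++ [cur'])
    else lineage

def reconstruct_lineage_alt (addr : Int) (p : Int) : List Int :=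
  pvBLoop ((addr - 1).toNat + 2) (PySem.Int.floordiv (addr - 1) p) p 1 p [1]

-- ===== PRECONDITION & SPEC =====
-- Pre_ excludes exactly where Python A does not return: p = 0 (ZeroDivisionError in val % p)
-- and p = 1 with addr > 1 (val //= 1 never shrinks, so the first loop diverges).
def Pre_reconstruct_lineage (addr : Int) (p : Int) : Prop := p ≠ 0 ∧ ¬ (p = 1 ∧ addr > 1)
instance (addr : Int) (p : Int) : Decidable (Pre_reconstruct_lineage addr p) := by
  unfold Pre_reconstruct_lineage; infer_instance

def pvWitness_reconstruct_lineage : Int × Int := (137, 5)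

def Spec_reconstruct_lineage (addr : Int) (p : Int) (out : List Int) : Prop := out = reconstruct_lineage_alt addr p
instance (addr : Int) (p : Int) (out : List Int) : Decidable (Spec_reconstruct_lineage addr p out) := by unfold Spec_reconstruct_lineage; infer_instance

-- ===== CLAIM (what is proved, stated in full; the proofs are below) =====
def Claim_equal_reconstruct_lineage : Prop := ∀ (addr : Int) (p : Int), Dom_reconstruct_lineage addr p → Pre_reconstruct_lineage addr p → Spec_reconstruct_lineage addr p (reconstruct_lineage addr p)

-- ===== LEMMAS AND PROOFS =====

-- The base-p digit stream of val (fuel-bounded), shared shape of both loops.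
def pvDigits (fuel : Nat) (val p : Int) : List Int :=
  match fuel with
  | 0 => []
  | f + 1 =>
    if val > 0 then PySem.Int.mod val p :: pvDigits f (PySem.Int.floordiv val p) p
    else []

-- Running chain: successive coordinates from a digit stream and a running power.
def pvChain (ds : List Int) (p cur pow : Int) : List Int :=
  match ds with
  | [] => []
  | d :: ds =>
    let c := cur + d * pow
    c :: pvChain ds p c (pow * p)

theorem pvALoop_ne_zero (f : Nat) (val p k : Int) (coeffs : List Int) (hk : 0 < k) :
    pvALoop f val p k coeffs = coeffs ++ pvDigits f val p := by
  induction f generalizing val k coeffs with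
  | zero => simp [pvALoop, pvDigits]
  | succ f ih =>
    by_cases h : val > 0
    · have hk' : ¬ k = 0 := by omega
      simp only [pvALoop, pvDigits, h, hk', if_pos, true_or]
      rw [ih (PySem.Int.floordiv val p) (k + 1) (coeffs ++ [PySem.Int.mod val p]) (by omega)]
      simp
    · have hk' : ¬ k = 0 := by omega
      simp [pvALoop, pvDigits, h, hk']

theorem pvBLoop_eq_chain (f : Nat) (val p cur pow : Int) (acc : List Int) :
    pvBLoop f val p cur pow acc = acc ++ pvChain (pvDigits f val p) p cur pow := by
  induction f generalizing val cur pow acc with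
  | zero => simp [pvBLoop, pvDigits, pvChain]
  | succ f ih =>
    by_cases h : val > 0
    · simp [pvBLoop, pvDigits, pvChain, h, ih]
    · simp [pvBLoop, pvDigits, pvChain, h]

theorem pvFold_eq_chain (coeffs : List Int) (p : Int) (j : Nat) (hj : j ≤ coeffs.length) :
    ∀ (cur : Int) (acc : List Int), ∃ c : Int,
      (PySem.List.pyRange (j : Int) (coeffs.length : Int) 1).foldl
        (fun (s : Int × List Int) i =>
          let cur := s.1 + (PySem.List.pyGetD coeffs i 0) * p ^ i.toNat
          (cur, s.2 ++ [cur])) (cur, acc)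
      = (c, acc ++ pvChain (coeffs.drop j) p cur (p ^ j)) := by
  induction hn : coeffs.length - j generalizing j with
  | zero =>
    intro cur acc
    have hj' : j = coeffs.length := by omega
    subst hj'
    refine ⟨cur, ?_⟩
    rw [PySem.List.pyRange_one_eq_nil (by omega)]
    simp [pvChain]
  | succ n ih =>
    intro cur acc
    have hjl : j < coeffs.length := by omega
    rw [PySem.List.pyRange_one_cons (by exact_mod_cast hjl)]
    simp only [List.foldl_cons]
    have hget : PySem.List.pyGetD coeffs (j : Int) 0 = coeffs.getD j 0 :=
      PySem.List.pyGetD_natCast coeffs j 0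
    have hdrop : coeffs.drop j = coeffs[j] :: coeffs.drop (j + 1) :=
      List.drop_eq_getElem_cons hjl
    obtain ⟨c, hc⟩ := ih (j + 1) (by omega) (by omega)
      (cur + coeffs.getD j 0 * p ^ j) (acc ++ [cur + coeffs.getD j 0 * p ^ j])
    refine ⟨c, ?_⟩
    have : ((j : Int) + 1) = ((j + 1 : Nat) : Int) := by push_cast; ring
    simp only [hget, Int.toNat_natCast, this] at *
    rw [hc, hdrop]
    simp [pvChain, List.getD_eq_getElem?_getD, List.getElem?_eq_getElem hjl, pow_succ,
      List.append_assoc]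

-- ===== VERDICT (by name: the statement is the Claim_ definition above) =====

theorem reconstruct_lineage_spec : Claim_equal_reconstruct_lineage := by
  intro addr p _ _
  unfold Spec_reconstruct_lineage reconstruct_lineage reconstruct_lineage_alt
  set F : Nat := (addr - 1).toNat + 2 with hF
  have hco : pvALoop (F + 1) (addr - 1) p 0 [] =
      PySem.Int.mod (addr - 1) p :: pvDigits F (PySem.Int.floordiv (addr - 1) p) p := by
    rw [show pvALoop (F + 1) (addr - 1) p 0 [] =
        pvALoop F (PySem.Int.floordiv (addr - 1) p) p 1 [PySem.Int.mod (addr - 1) p] by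
      simp [pvALoop]]
    rw [pvALoop_ne_zero _ _ _ _ _ (by omega)]
    simp
  have hF3 : (addr - 1).toNat + 3 = F + 1 := by omega
  rw [hF3, hco]
  simp only []
  obtain ⟨c, hc⟩ := pvFold_eq_chain
    (PySem.Int.mod (addr - 1) p :: pvDigits F (PySem.Int.floordiv (addr - 1) p) p) p 1
    (by simp) 1 [1]
  simp only [Nat.cast_one] at hc
  rw [hc, pvBLoop_eq_chain]
  simp [pow_one]
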